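-- pv_equiv track=rewrite | github.com/hyojing8192-spec/streamlit_deploy | travel_city_weather_dashboard.py | _format_best_period_label
-- ===== SOURCE A (Python) =====
-- def _format_best_period_label(months: list[int]) -> str:
--     if not months:
--         return "—"
--     months = sorted(set(int(m) for m in months))
--     ranges: list[tuple[int, int]] = []
--     start = prev = months[0]
--     for m in months[1:]:
--         if m == prev + 1:
--             prev = m
--         else:
--             ranges.append((start, prev))
--             start = prev = m
--     ranges.append((start, prev))
--     parts: list[str] = []
--     for a, b in ranges:
--         parts.append(f"{a}월" if a == b else f"{a}~{b}월")
--     return ", ".join(parts)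
-- ===== SOURCE B (Python) =====
-- from itertools import groupby
--
--
-- def _format_best_period_label(months: list[int]) -> str:
--     if not months:
--         return "—"
--     ms = sorted(set(int(m) for m in months))
--     parts: list[str] = []
--     for _, grp in groupby(enumerate(ms), key=lambda p: p[1] - p[0]):
--         g = list(grp)
--         a, b = g[0][1], g[-1][1]
--         parts.append(f"{a}월" if a == b else f"{a}~{b}월")
--     return ", ".join(parts)
-- ===== Notes on version B (the rewrite author's own statement) =====
-- stated objective: idiomatic
-- what changed: Replaced the explicit start/prev accumulator loop that appends a range at every break with itertools.groupby over enumerate(ms) keyed by value-minus-index, so consecutive runs are identified by a constant derived key instead of mutable loop state.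
import Mathlib
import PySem

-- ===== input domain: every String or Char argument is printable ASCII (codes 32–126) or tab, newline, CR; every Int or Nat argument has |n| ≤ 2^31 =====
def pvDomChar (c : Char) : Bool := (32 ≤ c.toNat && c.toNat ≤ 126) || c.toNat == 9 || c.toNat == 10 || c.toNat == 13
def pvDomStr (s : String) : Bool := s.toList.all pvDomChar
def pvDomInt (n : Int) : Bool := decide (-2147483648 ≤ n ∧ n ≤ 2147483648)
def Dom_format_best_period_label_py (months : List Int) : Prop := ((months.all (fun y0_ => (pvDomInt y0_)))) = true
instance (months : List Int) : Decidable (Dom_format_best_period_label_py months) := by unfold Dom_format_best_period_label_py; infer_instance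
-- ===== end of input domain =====

-- B replaces A's explicit start/prev accumulator loop with itertools-style grouping of
-- (index, value) pairs by the constant value-minus-index key (objective: idiomatic; same cost).

-- f"{a}월" / f"{a}~{b}월" (shared formatting of one range, identical in both Pythons)
def pvFmt (a b : Int) : String :=
  if a = b then PySem.Int.toStr a ++ "월" else PySem.Int.toStr a ++ "~" ++ PySem.Int.toStr b ++ "월"

-- ===== PORT A =====
-- A's for-loop over months[1:] with mutable start/prev, appending a range on each break
def pvRangesA (start prev : Int) : List Int → List (Int × Int)
  | [] => [(start, prev)]
  | m :: rest =>
      if m = prev + 1 then pvRangesA start m rest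
      else (start, prev) :: pvRangesA m m rest

def format_best_period_label_py (months : List Int) : String :=
  if months = [] then "—"
  else
    match PySem.List.sorted (PySem.Set.ofList months) (fun x => x) false with
    | [] => "—"   -- unreachable: sorted(set(months)) of a nonempty months is nonempty (months[0] would raise only here)
    | h :: t => PySem.Str.join ", " ((pvRangesA h h t).map (fun r => pvFmt r.1 r.2))

-- ===== PORT B =====
-- itertools.groupby over enumerate(ms) with key p[1]-p[0]: each maximal run of equal key is one group
def pvGroupBy : List (Int × Int) → List (List (Int × Int))
  | [] => []
  | p :: rest =>
      (p :: rest.takeWhile (fun q => q.2 - q.1 == p.2 - p.1)) ::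
        pvGroupBy (rest.dropWhile (fun q => q.2 - q.1 == p.2 - p.1))
termination_by l => l.length
decreasing_by
  simp only [List.length_cons]
  exact Nat.lt_succ_of_le (List.length_dropWhile_le _ _)

-- g[-1][1]: last value of a group, seeded with the first value
def pvLastVal (a : Int) : List (Int × Int) → Int
  | [] => a
  | q :: r => pvLastVal q.2 r

def format_best_period_label_py_alt (months : List Int) : String :=
  if months = [] then "—"
  else
    let ms := PySem.List.sorted (PySem.Set.ofList months) (fun x => x) false
    PySem.Str.join ", "
      ((pvGroupBy (PySem.List.enumerate ms)).map (fun g =>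
        match g with
        | [] => ""   -- unreachable: groupby yields nonempty groups
        | p :: run => pvFmt p.2 (pvLastVal p.2 run)))

-- ===== PRECONDITION & SPEC =====
def Spec_format_best_period_label_py (months : List Int) (out : String) : Prop := out = format_best_period_label_py_alt months
instance (months : List Int) (out : String) : Decidable (Spec_format_best_period_label_py months out) := by unfold Spec_format_best_period_label_py; infer_instance

-- ===== CLAIM (what is proved, stated in full; the proofs are below) =====
def Claim_equal_format_best_period_label_py : Prop := ∀ (months : List Int), Dom_format_best_period_label_py months → Spec_format_best_period_label_py months (format_best_period_label_py months)

-- ===== LEMMAS AND PROOFS =====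

-- (the run continuing from prev: its last value, and the remaining suffix)
def pvConsec (prev : Int) : List Int → Int × List Int
  | [] => (prev, [])
  | m :: t => if m = prev + 1 then pvConsec m t else (prev, m :: t)

theorem pvConsec_len : ∀ (t : List Int) (prev : Int), (pvConsec prev t).2.length ≤ t.length := by
  intro t
  induction t with
  | nil => intro prev; simp [pvConsec]
  | cons m t ih =>
      intro prev
      simp only [pvConsec]
      split
      · exact le_trans (ih m) (Nat.le_succ _)
      · simp

-- reference decomposition into maximal consecutive runs
def pvRuns : List Int → List (Int × Int)
  | [] => []
  | h :: t => (h, (pvConsec h t).1) :: pvRuns (pvConsec h t).2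
termination_by l => l.length
decreasing_by
  exact Nat.lt_succ_of_le (pvConsec_len _ _)

theorem pvRangesA_eq_runs : ∀ (t : List Int) (start prev : Int),
    pvRangesA start prev t = (start, (pvConsec prev t).1) :: pvRuns (pvConsec prev t).2 := by
  intro t
  induction t with
  | nil => intro start prev; simp [pvRangesA, pvConsec, pvRuns]
  | cons m t ih =>
      intro start prev
      simp only [pvRangesA, pvConsec]
      split
      · exact ih start m
      · rw [ih m m]
        simp [pvRuns]

theorem pvSpan : ∀ (t : List Int) (prev k c : Int), c = prev - k →
    pvLastVal prev ((PySem.List.enumerate t (k+1)).takeWhile (fun q => q.2 - q.1 == c))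
      = (pvConsec prev t).1
    ∧ ∃ k', (PySem.List.enumerate t (k+1)).dropWhile (fun q => q.2 - q.1 == c)
      = PySem.List.enumerate (pvConsec prev t).2 k' := by
  intro t
  induction t with
  | nil =>
      intro prev k c hc
      refine ⟨by simp [PySem.List.enumerate_nil, pvLastVal, pvConsec], ⟨0, by simp [PySem.List.enumerate_nil, pvConsec]⟩⟩
  | cons m t ih =>
      intro prev k c hc
      rw [PySem.List.enumerate_cons]
      by_cases hm : m = prev + 1
      · have hpred : (m - (k+1) == c) = true := by
          subst hc hm; simp only [beq_iff_eq]; ring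
        have hc' : c = m - (k+1) := by subst hc hm; ring
        obtain ⟨h1, k', h2⟩ := ih m (k+1) c hc'
        constructor
        · rw [List.takeWhile_cons]
          simp only [hpred, if_true]
          simp only [pvLastVal]
          rw [h1]
          simp [pvConsec, hm]
        · refine ⟨k', ?_⟩
          rw [List.dropWhile_cons]
          simp only [hpred, if_true]
          rw [h2]
          simp [pvConsec, hm]
      · have hpred : (m - (k+1) == c) = true → False := by
          subst hc; intro h; apply hm; have := of_decide_eq_true h; omega
        have hpred' : (m - (k+1) == c) = false := by
          cases h : (m - (k+1) == c) with
          | true => exact absurd h hpred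
          | false => rfl
        constructor
        · rw [List.takeWhile_cons]
          simp only [hpred']
          simp [pvLastVal, pvConsec, hm]
        · refine ⟨k+1, ?_⟩
          rw [List.dropWhile_cons]
          simp only [hpred']
          simp [pvConsec, hm, PySem.List.enumerate_cons]

def pvPartFn (g : List (Int × Int)) : String :=
  match g with
  | [] => ""
  | p :: run => pvFmt p.2 (pvLastVal p.2 run)

theorem pvGroups_eq_runs : ∀ (n : Nat) (l : List Int), l.length ≤ n → ∀ (k : Int),
    (pvGroupBy (PySem.List.enumerate l k)).map pvPartFn = (pvRuns l).map (fun r => pvFmt r.1 r.2) := by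
  intro n
  induction n with
  | zero =>
      intro l hl k
      have : l = [] := List.length_eq_zero_iff.mp (Nat.le_zero.mp hl)
      subst this
      simp [PySem.List.enumerate_nil, pvGroupBy, pvRuns]
  | succ n ih =>
      intro l hl k
      cases l with
      | nil => simp [PySem.List.enumerate_nil, pvGroupBy, pvRuns]
      | cons h t =>
          rw [PySem.List.enumerate_cons]
          rw [pvGroupBy]
          obtain ⟨h1, k', h2⟩ := pvSpan t h k (h - k) rfl
          simp only [List.map_cons]
          rw [pvRuns]
          simp only [List.map_cons]
          congr 1
          · simp only [pvPartFn]
            rw [h1]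
          · rw [h2]
            apply ih
            have := pvConsec_len t h
            simp only [List.length_cons] at hl
            omega

theorem pvOfList_ne_nil {months : List Int} (h : months ≠ []) : PySem.Set.ofList months ≠ [] := by
  cases months with
  | nil => exact absurd rfl h
  | cons x xs =>
      intro hnil
      have : x ∈ PySem.Set.ofList (x :: xs) := (PySem.Set.mem_ofList _ _).mpr (List.mem_cons_self)
      rw [hnil] at this
      exact absurd this (List.not_mem_nil)

-- ===== VERDICT (by name: the statement is the Claim_ definition above) =====
theorem format_best_period_label_py_spec : Claim_equal_format_best_period_label_py := by
  intro months _
  unfold Spec_format_best_period_label_py format_best_period_label_py format_best_period_label_py_alt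
  by_cases hnil : months = []
  · simp [hnil]
  · simp only [hnil, if_false]
    have hs : PySem.List.sorted (PySem.Set.ofList months) (fun x => x) false ≠ [] := by
      intro h
      exact pvOfList_ne_nil hnil ((PySem.List.sorted_eq_nil_iff _ _ _).mp h)
    cases hms : PySem.List.sorted (PySem.Set.ofList months) (fun x => x) false with
    | nil => exact absurd hms hs
    | cons h t =>
        have hg := pvGroups_eq_runs (h :: t).length (h :: t) le_rfl 0
        have hr := pvRangesA_eq_runs t h h
        simp only [PySem.List.enumerate] at hg ⊢
        congr 1
        rw [hr]
        rw [show (h, (pvConsec h t).1) :: pvRuns (pvConsec h t).2 = pvRuns (h :: t) from (by rw [pvRuns])]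
        rw [← hg]
        rfl
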